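-- pv_equiv track=rewrite | github.com/sunnnnnnnnnny/Leeetcode | 2554-maximum-number-of-integers-to-choose-from-a-range-i/2554. Maximum Number of Integers to Choose From a Range I.py | maxCount
-- ===== SOURCE A (Python) =====
-- from typing import List
--
-- def maxCount(banned: List[int], n: int, maxSum: int) -> int:
--     # time:O(logn) space:O(1)
--     banned = set(banned)
--     l = 0
--     h = n
--     while l<h:
--         mid = (l+h+1)//2
--         # mid = l + h + 1 >> 1
--         total = mid*(mid+1)//2
--         for x in banned:
--             if x<=mid:
--                 total -= x
--         if total<=maxSum:
--             l = mid
--         else: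
--             h = mid-1
--     return l - sum(x <= l for x in banned)
-- ===== SOURCE B (Python) =====
-- # Sort the distinct banned values once, precompute prefix sums, and answer each
-- # binary-search probe with a hand-rolled bisect instead of rescanning the whole set.
-- def maxCount(banned, n, maxSum):
--     b = sorted(set(banned))
--     pre = [0]
--     for x in b:
--         pre.append(pre[-1] + x)
--
--     def bis(m):
--         # number of elements of b that are <= m (b is strictly increasing)
--         lo, hi = 0, len(b)
--         while lo < hi:
--             mid = (lo + hi) // 2
--             if b[mid] <= m:
--                 lo = mid + 1
--             else:
--                 hi = mid
--         return lo
--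
--     l, h = 0, n
--     while l < h:
--         mid = (l + h + 1) // 2
--         if mid * (mid + 1) // 2 - pre[bis(mid)] <= maxSum:
--             l = mid
--         else:
--             h = mid - 1
--     return l - bis(l)
-- ===== Notes on version B (the rewrite author's own statement) =====
-- stated objective: faster
-- what changed: Instead of rescanning the whole banned set at every binary-search probe, B sorts the distinct banned values once, precomputes prefix sums, and answers each probe with a hand-rolled bisect (count and sum of banned values <= mid in O(log b)).
import Mathlib
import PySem

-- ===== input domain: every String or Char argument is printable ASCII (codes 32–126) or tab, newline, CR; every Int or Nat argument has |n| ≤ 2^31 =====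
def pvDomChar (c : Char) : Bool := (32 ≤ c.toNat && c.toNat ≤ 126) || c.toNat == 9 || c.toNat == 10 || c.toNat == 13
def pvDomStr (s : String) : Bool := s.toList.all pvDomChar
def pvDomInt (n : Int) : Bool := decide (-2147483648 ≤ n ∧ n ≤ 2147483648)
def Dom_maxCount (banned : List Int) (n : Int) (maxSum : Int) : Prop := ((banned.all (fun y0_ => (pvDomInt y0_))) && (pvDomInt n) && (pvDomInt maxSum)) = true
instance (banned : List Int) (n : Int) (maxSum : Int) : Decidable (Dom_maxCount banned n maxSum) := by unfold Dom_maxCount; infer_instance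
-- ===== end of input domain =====

-- B sorts the distinct banned values once and answers each binary-search probe with
-- prefix sums + bisect instead of rescanning the whole banned set (alternative/faster).

-- ===== PORT A =====
-- the 'while l < h' loop of A
def maxCountLoopA (s : List Int) (maxSum : Int) (l h : Int) : Int :=
  if hlt : l < h then
    let mid := PySem.Int.floordiv (l + h + 1) 2
    let total := s.foldl (fun t x => if x ≤ mid then t - x else t)
      (PySem.Int.floordiv (mid * (mid + 1)) 2)
    if total ≤ maxSum then maxCountLoopA s maxSum mid h
    else maxCountLoopA s maxSum l (mid - 1)
  else l
termination_by (h - l).toNat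
decreasing_by
  · have : PySem.Int.floordiv (l + h + 1) 2 = (l + h + 1) / 2 :=
      PySem.Int.floordiv_eq_ediv_of_pos (by norm_num)
    simp only [this] at *; omega
  · have : PySem.Int.floordiv (l + h + 1) 2 = (l + h + 1) / 2 :=
      PySem.Int.floordiv_eq_ediv_of_pos (by norm_num)
    simp only [this] at *; omega

def maxCount (banned : List Int) (n : Int) (maxSum : Int) : Int :=
  let s := PySem.Set.ofList banned
  let l := maxCountLoopA s maxSum 0 n
  l - s.foldl (fun acc x => acc + (if x ≤ l then 1 else 0)) 0

-- ===== PORT B =====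
-- the 'while lo < hi' loop of B's helper bis
def bisLoop (b : List Int) (m : Int) (lo hi : Int) : Int :=
  if hlt : lo < hi then
    let mid := PySem.Int.floordiv (lo + hi) 2
    if PySem.List.pyGetD b mid 0 ≤ m then bisLoop b m (mid + 1) hi
    else bisLoop b m lo mid
  else lo
termination_by (hi - lo).toNat
decreasing_by
  · have : PySem.Int.floordiv (lo + hi) 2 = (lo + hi) / 2 :=
      PySem.Int.floordiv_eq_ediv_of_pos (by norm_num)
    simp only [this] at *; omega
  · have : PySem.Int.floordiv (lo + hi) 2 = (lo + hi) / 2 :=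
      PySem.Int.floordiv_eq_ediv_of_pos (by norm_num)
    simp only [this] at *; omega

-- bis(m): count of elements of b that are <= m, by binary search
def bisB (b : List Int) (m : Int) : Int := bisLoop b m 0 (b.length : Int)

-- pre = [0]; for x in b: pre.append(pre[-1] + x)
def preB (b : List Int) : List Int :=
  b.foldl (fun acc x => acc ++ [PySem.List.pyGetD acc (-1) 0 + x]) [(0 : Int)]

-- the 'while l < h' loop of B
def maxCountLoopB (b pre : List Int) (maxSum : Int) (l h : Int) : Int :=
  if hlt : l < h then
    let mid := PySem.Int.floordiv (l + h + 1) 2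
    if PySem.Int.floordiv (mid * (mid + 1)) 2 - PySem.List.pyGetD pre (bisB b mid) 0 ≤ maxSum
    then maxCountLoopB b pre maxSum mid h
    else maxCountLoopB b pre maxSum l (mid - 1)
  else l
termination_by (h - l).toNat
decreasing_by
  · have : PySem.Int.floordiv (l + h + 1) 2 = (l + h + 1) / 2 :=
      PySem.Int.floordiv_eq_ediv_of_pos (by norm_num)
    simp only [this] at *; omega
  · have : PySem.Int.floordiv (l + h + 1) 2 = (l + h + 1) / 2 :=
      PySem.Int.floordiv_eq_ediv_of_pos (by norm_num)
    simp only [this] at *; omega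

def maxCount_alt (banned : List Int) (n : Int) (maxSum : Int) : Int :=
  let b := PySem.List.sorted (PySem.Set.ofList banned) (fun x => x) false
  let pre := preB b
  let l := maxCountLoopB b pre maxSum 0 n
  l - bisB b l

-- ===== PRECONDITION & SPEC =====
def Spec_maxCount (banned : List Int) (n : Int) (maxSum : Int) (out : Int) : Prop := out = maxCount_alt banned n maxSum
instance (banned : List Int) (n : Int) (maxSum : Int) (out : Int) : Decidable (Spec_maxCount banned n maxSum out) := by unfold Spec_maxCount; infer_instance

-- ===== CLAIM (what is proved, stated in full; the proofs are below) =====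
def Claim_equal_maxCount : Prop := ∀ (banned : List Int) (n : Int) (maxSum : Int), Dom_maxCount banned n maxSum → Spec_maxCount banned n maxSum (maxCount banned n maxSum)

-- ===== LEMMAS AND PROOFS =====

-- A's subtracting loop removes the sum of kept-small banned values
lemma foldl_sub_filter (m T : Int) (s : List Int) :
    s.foldl (fun t x => if x ≤ m then t - x else t) T
      = T - (s.filter (fun x => decide (x ≤ m))).sum := by
  induction s generalizing T with
  | nil => simp
  | cons y ys ih =>
    by_cases hy : y ≤ m <;> simp [List.foldl_cons, hy, ih] <;> ring

-- A's final boolean sum is a countP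
lemma foldl_count (m acc : Int) (s : List Int) :
    s.foldl (fun a x => a + (if x ≤ m then 1 else 0)) acc
      = acc + (s.countP (fun x => decide (x ≤ m)) : Int) := by
  induction s generalizing acc with
  | nil => simp
  | cons y ys ih =>
    by_cases hy : y ≤ m <;> simp [List.foldl_cons, hy, ih] <;> push_cast <;> ring

-- in a sorted list the elements ≤ m form a prefix
lemma filter_eq_take_of_sorted {b : List Int} (hb : b.Pairwise (· ≤ ·)) (m : Int) :
    b.filter (fun x => decide (x ≤ m)) = b.take (b.countP (fun x => decide (x ≤ m))) := by
  induction b with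
  | nil => simp
  | cons y ys ih =>
    rcases List.pairwise_cons.mp hb with ⟨hy, hys⟩
    by_cases h : y ≤ m
    · simp [h, ih hys]
    · have hnil : ys.filter (fun x => decide (x ≤ m)) = [] := by
        rw [List.filter_eq_nil_iff]
        intro z hz
        simp only [decide_eq_true_eq]
        intro hzm
        exact h (le_trans (hy z hz) hzm)
      have hcnt : ys.countP (fun x => decide (x ≤ m)) = 0 := by
        simpa [List.countP_eq_length_filter] using congrArg List.length hnil
      simp [h, hnil, hcnt]

-- index characterisation: b[i] ≤ m ↔ i < countP
lemma getElem_le_iff_lt_countP {b : List Int} (hb : b.Pairwise (· ≤ ·)) (m : Int)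
    (i : Nat) (hi : i < b.length) :
    b[i] ≤ m ↔ i < b.countP (fun x => decide (x ≤ m)) := by
  set c := b.countP (fun x => decide (x ≤ m)) with hc
  constructor
  · intro him
    by_contra hlt
    rw [not_lt] at hlt
    have hmono : ∀ j, j ≤ i → ∀ hj : j < b.length, b[j] ≤ m := by
      intro j hji hj
      rcases lt_or_eq_of_le hji with hji' | rfl
      · exact le_trans (List.pairwise_iff_getElem.mp hb j i hj hi hji') him
      · exact him
    have hlen : (b.take (i+1)).length = i + 1 := by simp; omega
    have htake : (b.take (i+1)).countP (fun x => decide (x ≤ m)) = (b.take (i+1)).length := by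
      rw [List.countP_eq_length]
      intro a ha
      rw [List.mem_take_iff_getElem] at ha
      rcases ha with ⟨j, hj, rfl⟩
      simp only [decide_eq_true_eq]
      exact hmono j (by omega) _
    have := List.countP_append (l₁ := b.take (i+1)) (l₂ := b.drop (i+1)) (p := fun x => decide (x ≤ m))
    rw [List.take_append_drop] at this
    omega
  · intro hlt
    have hmem : b[i] ∈ b.take c := by
      have : (b.take c)[i]'(by simp [hc]; omega) = b[i] := List.getElem_take
      exact this ▸ List.getElem_mem _
    have hf := filter_eq_take_of_sorted hb m
    rw [← hc] at hf
    rw [← hf] at hmem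
    simpa using List.of_mem_filter hmem

-- the binary-search loop of B finds countP
lemma bisLoop_eq {b : List Int} (hb : b.Pairwise (· ≤ ·)) (m : Int)
    (lo hi : Int) (h0 : 0 ≤ lo) (h1 : hi ≤ (b.length : Int))
    (h2 : lo ≤ (b.countP (fun x => decide (x ≤ m)) : Int))
    (h3 : (b.countP (fun x => decide (x ≤ m)) : Int) ≤ hi) :
    bisLoop b m lo hi = (b.countP (fun x => decide (x ≤ m)) : Int) := by
  rw [bisLoop]
  by_cases hlt : lo < hi
  · have hfd : PySem.Int.floordiv (lo + hi) 2 = (lo + hi) / 2 :=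
      PySem.Int.floordiv_eq_ediv_of_pos (by norm_num)
    simp only [dif_pos hlt, hfd]
    set mid := (lo + hi) / 2 with hmid
    have hmlen : mid.toNat < b.length := by omega
    have hget : PySem.List.pyGetD b mid 0 = b[mid.toNat] := by
      exact PySem.List.pyGetD_eq_getElem b 0 (by omega) (by omega)
    have hchar := getElem_le_iff_lt_countP hb m mid.toNat hmlen
    by_cases hc : PySem.List.pyGetD b mid 0 ≤ m
    · rw [if_pos hc]
      have hlt' : mid.toNat < b.countP (fun x => decide (x ≤ m)) := hchar.mp (hget ▸ hc)
      exact bisLoop_eq hb m (mid + 1) hi (by omega) h1 (by omega) h3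
    · rw [if_neg hc]
      have hge' : ¬ mid.toNat < b.countP (fun x => decide (x ≤ m)) := fun h => hc (hget ▸ hchar.mpr h)
      exact bisLoop_eq hb m lo mid h0 (by omega) h2 (by omega)
  · simp only [dif_neg hlt]
    omega
termination_by (hi - lo).toNat
decreasing_by
  · omega
  · omega

lemma bisB_eq {b : List Int} (hb : b.Pairwise (· ≤ ·)) (m : Int) :
    bisB b m = (b.countP (fun x => decide (x ≤ m)) : Int) := by
  have hc : b.countP (fun x => decide (x ≤ m)) ≤ b.length := List.countP_le_length
  exact bisLoop_eq hb m 0 b.length (by omega) (by omega) (by omega) (by omega)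

-- running prefix sums
def psums (s : Int) : List Int → List Int
  | [] => []
  | x :: xs => (s + x) :: psums (s + x) xs

lemma preB_fold (b : List Int) (p : List Int) (s : Int) :
    b.foldl (fun acc x => acc ++ [PySem.List.pyGetD acc (-1) 0 + x]) (p ++ [s])
      = (p ++ [s]) ++ psums s b := by
  induction b generalizing p s with
  | nil => simp [psums]
  | cons x xs ih =>
    simp only [List.foldl_cons, PySem.List.pyGetD_neg_one_append_singleton]
    have := ih (p ++ [s]) (s + x)
    rw [List.append_assoc] at this ⊢
    simpa [psums, List.append_assoc] using this

lemma preB_eq (b : List Int) : preB b = 0 :: psums 0 b := by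
  have := preB_fold b [] 0
  simpa [preB] using this

lemma getD_psums (b : List Int) : ∀ (s : Int) (k : Nat), k ≤ b.length →
    (s :: psums s b).getD k 0 = s + (b.take k).sum := by
  induction b with
  | nil =>
    intro s k hk
    have : k = 0 := by simpa using hk
    subst this
    simp [psums]
  | cons x xs ih =>
    intro s k hk
    cases k with
    | zero => simp
    | succ k' =>
      have := ih (s + x) k' (by simpa using hk)
      simp only [psums, List.getD_cons_succ] at this ⊢
      rw [this, List.take_succ_cons, List.sum_cons]
      ring

-- totals agree at every probe
lemma total_eq (banned : List Int) (mid T : Int) :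
    (PySem.Set.ofList banned).foldl (fun t x => if x ≤ mid then t - x else t) T
      = T - PySem.List.pyGetD
          (preB (PySem.List.sorted (PySem.Set.ofList banned) (fun x => x) false))
          (bisB (PySem.List.sorted (PySem.Set.ofList banned) (fun x => x) false) mid) 0 := by
  set s := PySem.Set.ofList banned with hs
  set b := PySem.List.sorted s (fun x => x) false with hbdef
  have hb : b.Pairwise (· ≤ ·) := by
    simpa using PySem.List.sorted_pairwise (xs := s) (key := fun x => x)
  have hperm : b.Perm s := PySem.List.sorted_perm ..
  rw [foldl_sub_filter]
  congr 1
  have hsum : (s.filter (fun x => decide (x ≤ mid))).sum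
      = (b.filter (fun x => decide (x ≤ mid))).sum :=
    ((hperm.filter _).sum_eq).symm
  rw [hsum, filter_eq_take_of_sorted hb, bisB_eq hb, preB_eq]
  rw [PySem.List.pyGetD_natCast]
  have := getD_psums b 0 (b.countP (fun x => decide (x ≤ mid))) (List.countP_le_length)
  simp only [List.getD] at this ⊢
  rw [this]
  ring

-- the two outer binary-search loops run in lockstep
lemma loop_eq (s b pre : List Int) (maxSum : Int)
    (hk : ∀ mid T, s.foldl (fun t x => if x ≤ mid then t - x else t) T
        = T - PySem.List.pyGetD pre (bisB b mid) 0) :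
    ∀ l h : Int, maxCountLoopA s maxSum l h = maxCountLoopB b pre maxSum l h := by
  intro l h
  rw [maxCountLoopA, maxCountLoopB]
  by_cases hlt : l < h
  · simp only [dif_pos hlt, hk]
    split_ifs with hcond
    · exact loop_eq s b pre maxSum hk _ _
    · exact loop_eq s b pre maxSum hk _ _
  · simp only [dif_neg hlt]
termination_by l h => (h - l).toNat
decreasing_by
  · have : PySem.Int.floordiv (l + h + 1) 2 = (l + h + 1) / 2 :=
      PySem.Int.floordiv_eq_ediv_of_pos (by norm_num)
    simp only [this] at *; omega
  · have : PySem.Int.floordiv (l + h + 1) 2 = (l + h + 1) / 2 :=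
      PySem.Int.floordiv_eq_ediv_of_pos (by norm_num)
    simp only [this] at *; omega

-- ===== VERDICT (by name: the statement is the Claim_ definition above) =====
theorem maxCount_spec : Claim_equal_maxCount := by
  intro banned n maxSum _
  unfold Spec_maxCount
  simp only [maxCount, maxCount_alt]
  set s := PySem.Set.ofList banned with hs
  set b := PySem.List.sorted s (fun x => x) false with hbdef
  have hb : b.Pairwise (· ≤ ·) := by
    simpa using PySem.List.sorted_pairwise (xs := s) (key := fun x => x)
  have hperm : b.Perm s := PySem.List.sorted_perm ..
  have hloop : maxCountLoopA s maxSum 0 n = maxCountLoopB b (preB b) maxSum 0 n :=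
    loop_eq s b (preB b) maxSum (fun mid T => total_eq banned mid T) 0 n
  rw [hloop]
  set l := maxCountLoopB b (preB b) maxSum 0 n with hl
  rw [foldl_count, bisB_eq hb, hperm.countP_eq]
  omega
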